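-- pv_equiv track=rewrite | github.com/Formalren/Couterfactual-analysis | examples/Refute_Estimation_Tang.py | get_edges_remove
-- ===== SOURCE A (Python) =====
-- def get_edges_remove(scene_variables, action_variables, fault_variables):
--     """This function is used to exclude edges which are not possible"""
--     all_variable_names = scene_variables + action_variables + fault_variables
--     tabu_edges = [[-1 for _ in range(len(all_variable_names))] for _ in range(len(all_variable_names))]
--     # for id_variable in range(len(all_variable_names)):
--     #     tabu_edges[id_variable][id_variable] = 0
--     for id_variable in range(len(scene_variables)):
--         for id_variable1 in range(len(scene_variables)):
--             tabu_edges[id_variable1][id_variable] = 0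
--
--     for id_variable in range(len(scene_variables),len(scene_variables+action_variables)):
--         for id_variable1 in range(len(scene_variables+action_variables)):
--             tabu_edges[id_variable1][id_variable] = 0
--
--     for id_variable in range(len(scene_variables+action_variables),len(all_variable_names)):
--         for id_variable1 in range(len(all_variable_names)):
--             tabu_edges[id_variable1][id_variable] = 0
--
--     return tabu_edges
-- ===== SOURCE B (Python) =====
-- def get_edges_remove(scene_variables, action_variables, fault_variables):
--     """This function is used to exclude edges which are not possible"""
--     levels = [0] * len(scene_variables) + [1] * len(action_variables) + [2] * len(fault_variables)
--     n = len(levels)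
--     return [[0 if levels[i] <= levels[j] else -1 for j in range(n)] for i in range(n)]
-- ===== Notes on version B (the rewrite author's own statement) =====
-- stated objective: simpler
-- what changed: Replaces the -1-filled matrix plus three block-partitioned column-filling mutation loops with a precomputed level table (0=scene,1=action,2=fault) and one comprehension setting each entry directly to 0 iff level[row] <= level[col].
import Mathlib
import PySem

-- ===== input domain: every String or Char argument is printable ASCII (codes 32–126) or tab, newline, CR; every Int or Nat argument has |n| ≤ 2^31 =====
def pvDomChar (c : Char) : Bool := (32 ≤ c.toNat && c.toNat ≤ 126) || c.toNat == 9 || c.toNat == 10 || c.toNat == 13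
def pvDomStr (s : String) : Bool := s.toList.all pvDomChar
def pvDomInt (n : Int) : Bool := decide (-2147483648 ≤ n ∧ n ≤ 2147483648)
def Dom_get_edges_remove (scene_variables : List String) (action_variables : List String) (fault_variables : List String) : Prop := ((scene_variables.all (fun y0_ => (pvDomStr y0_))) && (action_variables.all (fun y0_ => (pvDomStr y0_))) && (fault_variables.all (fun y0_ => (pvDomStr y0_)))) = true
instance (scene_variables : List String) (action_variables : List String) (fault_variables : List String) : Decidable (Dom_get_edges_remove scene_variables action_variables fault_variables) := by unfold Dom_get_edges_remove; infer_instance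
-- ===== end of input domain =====

-- B replaces A's three block-partitioned column-filling mutation loops by a precomputed
-- level table and one comprehension (simpler decomposition; same asymptotic cost).

-- ===== PORT A =====
-- literal transliteration of A: -1-filled n×n matrix, then three column-block loops
-- (range(len(s),len(s+a)) is transliterated as List.range' s.length a.length, Python's
-- tabu_edges[i1][i] = 0 as List.modify i1 (·.set i 0); all indices are in range in A).
def get_edges_remove (scene_variables : List String) (action_variables : List String) (fault_variables : List String) : List (List Int) :=
  let all_variable_names := scene_variables ++ action_variables ++ fault_variables
  let tabu_edges : List (List Int) :=
    List.replicate all_variable_names.length (List.replicate all_variable_names.length (-1 : Int))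
  let t1 := (List.range scene_variables.length).foldl
    (fun t id_variable => (List.range scene_variables.length).foldl
      (fun t id_variable1 => t.modify id_variable1 (fun row => row.set id_variable 0)) t) tabu_edges
  let t2 := (List.range' scene_variables.length action_variables.length).foldl
    (fun t id_variable => (List.range (scene_variables ++ action_variables).length).foldl
      (fun t id_variable1 => t.modify id_variable1 (fun row => row.set id_variable 0)) t) t1
  let t3 := (List.range' (scene_variables ++ action_variables).length fault_variables.length).foldl
    (fun t id_variable => (List.range all_variable_names.length).foldl
      (fun t id_variable1 => t.modify id_variable1 (fun row => row.set id_variable 0)) t) t2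
  t3

-- ===== PORT B =====
def get_edges_remove_alt (scene_variables : List String) (action_variables : List String) (fault_variables : List String) : List (List Int) :=
  let levels : List Nat :=
    List.replicate scene_variables.length 0 ++ List.replicate action_variables.length 1
      ++ List.replicate fault_variables.length 2
  let n := levels.length
  (List.range n).map (fun i => (List.range n).map
    (fun j => if levels.getD i 0 ≤ levels.getD j 0 then (0 : Int) else -1))

-- ===== PRECONDITION & SPEC =====
def Spec_get_edges_remove (scene_variables : List String) (action_variables : List String) (fault_variables : List String) (out : List (List Int)) : Prop := out = get_edges_remove_alt scene_variables action_variables fault_variables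
instance (scene_variables : List String) (action_variables : List String) (fault_variables : List String) (out : List (List Int)) : Decidable (Spec_get_edges_remove scene_variables action_variables fault_variables out) := by unfold Spec_get_edges_remove; infer_instance

-- ===== CLAIM (what is proved, stated in full; the proofs are below) =====
def Claim_equal_get_edges_remove : Prop := ∀ (scene_variables : List String) (action_variables : List String) (fault_variables : List String), Dom_get_edges_remove scene_variables action_variables fault_variables → Spec_get_edges_remove scene_variables action_variables fault_variables (get_edges_remove scene_variables action_variables fault_variables)

-- ===== LEMMAS AND PROOFS =====

-- the inner loop of A: set column j to 0 in rows 0..k-1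
theorem pv_inner (k j : Nat) (t : List (List Int)) (r : Nat) :
    ((List.range k).foldl (fun t i => t.modify i (fun row => row.set j 0)) t)[r]? =
      if r < k then (fun row => row.set j 0) <$> t[r]? else t[r]? := by
  induction k with
  | zero => simp
  | succ k ih =>
    rw [List.range_succ, List.foldl_append]
    simp only [List.foldl_cons, List.foldl_nil, List.getElem?_modify, ih]
    rcases Nat.lt_trichotomy r k with h | h | h
    · rw [if_pos h, if_pos (by omega : r < k + 1)]
      cases t[r]? <;> simp [Nat.ne_of_gt h]
    · subst h
      rw [if_neg (by omega), if_pos (by omega : r < r + 1)]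
      cases t[r]? <;> simp
    · rw [if_neg (by omega), if_neg (by omega)]
      cases t[r]? <;> simp [Nat.ne_of_lt h]

-- one whole phase of A: for each column j in cols, set rows 0..k-1 of column j to 0
theorem pv_phase (cols : List Nat) (k : Nat) (t : List (List Int)) (r : Nat) :
    (cols.foldl (fun t j => (List.range k).foldl
          (fun t i => t.modify i (fun row => row.set j 0)) t) t)[r]? =
      if r < k then (fun row => cols.foldl (fun row j => row.set j 0) row) <$> t[r]? else t[r]? := by
  induction cols generalizing t with
  | nil =>
    split
    · simp
    · simp
  | cons j cols ih =>
    rw [List.foldl_cons, ih, pv_inner]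
    split <;> simp [Option.map_map] <;> rfl

-- entries of a row after setting the columns in cols to 0
theorem pv_row (cols : List Nat) (row : List Int) (c : Nat) :
    (cols.foldl (fun row j => row.set j 0) row)[c]? =
      if c ∈ cols ∧ c < row.length then some 0 else row[c]? := by
  induction cols generalizing row with
  | nil => simp
  | cons j cols ih =>
    rw [List.foldl_cons, ih]
    simp only [List.length_set, List.getElem?_set, List.mem_cons]
    split_ifs with h1 h2 h3 h4 <;> simp_all

theorem pv_levels (S A F r : Nat) (hr : r < S + A + F) :
    ((List.replicate S (0:Nat) ++ List.replicate A 1 ++ List.replicate F 2).getD r 0) =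
      if r < S then 0 else if r < S + A then 1 else 2 := by
  simp only [List.getD, List.getElem?_append, List.length_append, List.length_replicate,
    List.getElem?_replicate]
  split_ifs <;> simp_all <;> omega

theorem pv_rowlen (cols : List Nat) (row : List Int) :
    (cols.foldl (fun row j => row.set j 0) row).length = row.length := by
  induction cols generalizing row with
  | nil => rfl
  | cons j cols ih => simp [List.foldl_cons, ih]

theorem pv_main (S A F : Nat) :
    ((List.range' (S + A) F).foldl (fun t j => (List.range (S + A + F)).foldl
        (fun t i => t.modify i (fun row => row.set j 0)) t)
      ((List.range' S A).foldl (fun t j => (List.range (S + A)).foldl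
          (fun t i => t.modify i (fun row => row.set j 0)) t)
        ((List.range S).foldl (fun t j => (List.range S).foldl
            (fun t i => t.modify i (fun row => row.set j 0)) t)
          (List.replicate (S + A + F) (List.replicate (S + A + F) (-1 : Int)))))) =
    (List.range (S + A + F)).map (fun i => (List.range (S + A + F)).map (fun j =>
      if (List.replicate S (0:Nat) ++ List.replicate A 1 ++ List.replicate F 2).getD i 0 ≤
         (List.replicate S (0:Nat) ++ List.replicate A 1 ++ List.replicate F 2).getD j 0
      then (0 : Int) else -1)) := by
  apply List.ext_getElem?
  intro r
  rw [pv_phase, pv_phase, pv_phase, List.getElem?_map]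
  by_cases hr : r < S + A + F
  · rw [if_pos hr]
    have h0 : (List.replicate (S+A+F) (List.replicate (S+A+F) (-1:Int)))[r]? =
        some (List.replicate (S+A+F) (-1)) := by simp [hr]
    have h1 : (List.range (S+A+F))[r]? = some r := by simp [hr]
    rw [h0, h1]
    rcases Nat.lt_or_ge r S with hs | hs <;> rcases Nat.lt_or_ge r (S + A) with hsa | hsa
    · rw [if_pos hs, if_pos hsa]
      simp only [Option.map_eq_map, Option.map_some, Option.some.injEq]
      apply List.ext_getElem?
      intro c
      rw [List.getElem?_map]
      simp only [pv_row, pv_rowlen, List.length_replicate, List.mem_range, List.mem_range'_1,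
        List.getElem?_replicate, pv_levels S A F r hr]
      by_cases hc : c < S + A + F
      · have h2 : (List.range (S+A+F))[c]? = some c := by simp [hc]
        rw [h2, Option.map_some, pv_levels S A F c hc]
        split_ifs <;> first | rfl | omega
      · have h2 : (List.range (S+A+F))[c]? = none := by simp [Nat.not_lt.mp hc]
        rw [h2, Option.map_none]
        split_ifs <;> first | rfl | omega
    · omega
    · rw [if_neg (Nat.not_lt.mpr hs), if_pos hsa]
      simp only [Option.map_eq_map, Option.map_some, Option.some.injEq]
      apply List.ext_getElem?
      intro c
      rw [List.getElem?_map]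
      simp only [pv_row, pv_rowlen, List.length_replicate, List.mem_range'_1,
        List.getElem?_replicate, pv_levels S A F r hr]
      by_cases hc : c < S + A + F
      · have h2 : (List.range (S+A+F))[c]? = some c := by simp [hc]
        rw [h2, Option.map_some, pv_levels S A F c hc]
        split_ifs <;> first | rfl | omega
      · have h2 : (List.range (S+A+F))[c]? = none := by simp [Nat.not_lt.mp hc]
        rw [h2, Option.map_none]
        split_ifs <;> first | rfl | omega
    · rw [if_neg (Nat.not_lt.mpr hs), if_neg (Nat.not_lt.mpr hsa)]
      simp only [Option.map_eq_map, Option.map_some, Option.some.injEq]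
      apply List.ext_getElem?
      intro c
      rw [List.getElem?_map]
      simp only [pv_row, List.length_replicate, List.mem_range'_1,
        List.getElem?_replicate, pv_levels S A F r hr]
      by_cases hc : c < S + A + F
      · have h2 : (List.range (S+A+F))[c]? = some c := by simp [hc]
        rw [h2, Option.map_some, pv_levels S A F c hc]
        split_ifs <;> first | rfl | omega
      · have h2 : (List.range (S+A+F))[c]? = none := by simp [Nat.not_lt.mp hc]
        rw [h2, Option.map_none]
        split_ifs <;> first | rfl | omega
  · have h1 : (List.range (S+A+F))[r]? = none := by simp [Nat.not_lt.mp hr]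
    have h0 : (List.replicate (S+A+F) (List.replicate (S+A+F) (-1:Int)))[r]? = none := by
      simp [Nat.not_lt.mp hr]
    rw [if_neg hr, h0, h1]
    split_ifs <;> simp

-- ===== VERDICT (by name: the statement is the Claim_ definition above) =====
theorem get_edges_remove_spec : Claim_equal_get_edges_remove := by
  intro s a f _
  unfold Spec_get_edges_remove
  simp only [get_edges_remove, get_edges_remove_alt, List.length_append, List.length_replicate]
  exact pv_main s.length a.length f.length
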